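-- pv_equiv track=rewrite | github.com/allforeco/twiff | src/twiff/utils/parse.py | num_people_from_tokens
-- ===== SOURCE A (Python) =====
-- def num_people_from_tokens(tokens):
--     # Search for first token with run of 1
--     run = 0
--     num_people = None
--     for tdx, token in enumerate(tokens):
--         # Attempt to convert token to integer format - accumulate number of integers encountered.
--         try:
--             int(token)
--             run += 1
--         except:
--             if run==1:
--                 num_people = tokens[tdx-1]
--                 break
--             run = 0
--
--     return num_people
-- ===== SOURCE B (Python) =====
-- def _is_int(token):
--     try:
--         int(token)
--         return True
--     except:
--         return False
--
--
-- def _group_runs(tokens):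
--     # Stage 1: partition tokens into maximal runs of equal _is_int key.
--     groups = []
--     i = 0
--     while i < len(tokens):
--         k = _is_int(tokens[i])
--         j = i + 1
--         while j < len(tokens) and _is_int(tokens[j]) == k:
--             j += 1
--         groups.append((k, tokens[i:j]))
--         i = j
--     return groups
--
--
-- def num_people_from_tokens(tokens):
--     # Stage 2: first integer run of length 1 that is not the last run.
--     groups = _group_runs(tokens)
--     for i, (k, g) in enumerate(groups):
--         if k and len(g) == 1 and i + 1 < len(groups):
--             return g[0]
--     return None
-- ===== Notes on version B (the rewrite author's own statement) =====
-- stated objective: alternative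
-- what changed: Replaces A's single-pass run-counter state machine (with break and tokens[tdx-1] back-reference) by a two-stage groupby: first partition the tokens into maximal runs keyed by is_int, then scan the run list for the first integer run of length exactly 1 that is not the last run.
import Mathlib
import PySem

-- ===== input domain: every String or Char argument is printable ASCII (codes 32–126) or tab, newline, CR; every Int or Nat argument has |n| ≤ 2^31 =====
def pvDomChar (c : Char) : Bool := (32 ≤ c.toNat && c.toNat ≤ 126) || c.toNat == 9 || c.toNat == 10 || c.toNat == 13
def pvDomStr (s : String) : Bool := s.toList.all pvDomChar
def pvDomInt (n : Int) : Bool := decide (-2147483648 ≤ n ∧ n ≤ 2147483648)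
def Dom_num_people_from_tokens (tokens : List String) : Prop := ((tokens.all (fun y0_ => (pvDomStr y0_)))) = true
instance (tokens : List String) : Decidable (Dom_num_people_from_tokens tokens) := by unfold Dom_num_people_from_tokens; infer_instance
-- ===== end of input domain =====

-- B replaces A's one-pass run-counter state machine by a two-stage groupby: partition the
-- tokens into maximal runs keyed by is_int, then scan the runs; objective: alternative, same cost.

-- ===== PORT A =====
-- the enumerate-loop of A: state `run`; `break` becomes returning the found value
def aGo (tokens : List String) : List (Int × String) → Int → Option String
  | [], _ => none
  | (tdx, token) :: rest, run =>
    match PySem.Int.ofStr? token with       -- int(token) succeeds / raises ValueError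
    | some _ => aGo tokens rest (run + 1)
    | none =>
      if run == 1 then PySem.List.pyGet? tokens (tdx - 1)   -- num_people = tokens[tdx-1]; break
      else aGo tokens rest 0

def num_people_from_tokens (tokens : List String) : Option String :=
  aGo tokens (PySem.List.enumerate tokens) 0

-- ===== PORT B =====
def isIntTok (s : String) : Bool := (PySem.Int.ofStr? s).isSome

-- _group_runs: the outer while advances one maximal run per step (recursion on the suffix);
-- the inner while collecting tokens with the same key is takeWhile/dropWhile at the suffix
def groupRuns : List String → List (Bool × List String)
  | [] => []
  | t :: rest =>
    let k := isIntTok t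
    (k, t :: rest.takeWhile (fun s => isIntTok s == k)) ::
      groupRuns (rest.dropWhile (fun s => isIntTok s == k))
termination_by l => l.length
decreasing_by
  simpa using Nat.lt_succ_of_le (List.length_dropWhile_le _ rest)

-- the scan over the run list: `i + 1 < len(groups)` is `rest ≠ []`; g[0] is g.head?
def firstIsolated : List (Bool × List String) → Option String
  | [] => none
  | (k, g) :: rest =>
    if k && g.length == 1 && !rest.isEmpty then g.head? else firstIsolated rest

def num_people_from_tokens_alt (tokens : List String) : Option String :=
  firstIsolated (groupRuns tokens)

-- ===== PRECONDITION & SPEC =====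
def Spec_num_people_from_tokens (tokens : List String) (out : Option String) : Prop := out = num_people_from_tokens_alt tokens
instance (tokens : List String) (out : Option String) : Decidable (Spec_num_people_from_tokens tokens out) := by unfold Spec_num_people_from_tokens; infer_instance

-- ===== CLAIM (what is proved, stated in full; the proofs are below) =====
def Claim_equal_num_people_from_tokens : Prop := ∀ (tokens : List String), Dom_num_people_from_tokens tokens → Spec_num_people_from_tokens tokens (num_people_from_tokens tokens)

-- ===== LEMMAS AND PROOFS =====

theorem drop_eq_cons_get (tokens : List String) (k : Nat) (t : String) (rest : List String)
    (h : tokens.drop k = t :: rest) : PySem.List.pyGet? tokens (k : Int) = some t := by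
  rw [PySem.List.pyGet?_natCast]
  have h0 : (tokens.drop k)[0]? = some t := by rw [h]; rfl
  rw [List.getElem?_drop] at h0
  simpa using h0

-- A's loop walks through a block of non-int tokens with run = 0 unchanged
theorem falseScan (tokens : List String) (g : List String) (hg : ∀ s ∈ g, isIntTok s = false) :
    ∀ (l' : List String) (k : Int),
      aGo tokens (PySem.List.enumerate (g ++ l') k) 0 =
        aGo tokens (PySem.List.enumerate l' (k + g.length)) 0 := by
  induction g with
  | nil => intro l' k; simp
  | cons t g' ih =>
    intro l' k
    have ht : PySem.Int.ofStr? t = none := by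
      have := hg t (by simp)
      cases h : PySem.Int.ofStr? t with
      | none => rfl
      | some v => simp [isIntTok, h] at this
    rw [List.cons_append, PySem.List.enumerate_cons]
    simp only [aGo, ht]
    rw [if_neg (by decide)]
    rw [ih (fun s hs => hg s (by simp [hs])) l' (k + 1)]
    congr 1
    · congr 1; push_cast [List.length_cons]; ring
  
-- A's loop walks through a block of int tokens, adding its length to run
theorem intScan (tokens : List String) (g : List String) (hg : ∀ s ∈ g, isIntTok s = true) :
    ∀ (l' : List String) (k run : Int),
      aGo tokens (PySem.List.enumerate (g ++ l') k) run =
        aGo tokens (PySem.List.enumerate l' (k + g.length)) (run + g.length) := by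
  induction g with
  | nil => intro l' k run; simp
  | cons t g' ih =>
    intro l' k run
    obtain ⟨v, hv⟩ : ∃ v, PySem.Int.ofStr? t = some v := by
      simpa [isIntTok, Option.isSome_iff_exists] using hg t (by simp)
    rw [List.cons_append, PySem.List.enumerate_cons]
    simp only [aGo, hv]
    rw [ih (fun s hs => hg s (by simp [hs])) l' (k + 1) (run + 1)]
    congr 1
    · congr 1; push_cast [List.length_cons]; ring
    · push_cast [List.length_cons]; ring

-- head of a dropWhile fails the predicate
theorem dropWhile_head_false {A : Type} (p : A → Bool) :
    ∀ (l : List A) (u : A) (tail : List A), l.dropWhile p = u :: tail → p u = false := by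
  intro l
  induction l with
  | nil => intro u tail h; simp at h
  | cons a l ih =>
    intro u tail h
    by_cases hp : p a = true
    · rw [List.dropWhile_cons_of_pos hp] at h; exact ih u tail h
    · rw [List.dropWhile_cons_of_neg hp] at h
      cases h
      simpa using hp

-- main simulation: on any suffix l of tokens, A's loop in fresh state computes
-- B's scan of the grouping of l
theorem key : ∀ (n : Nat) (l tokens : List String) (k : Nat), l.length ≤ n →
    tokens.drop k = l →
    aGo tokens (PySem.List.enumerate l (k : Nat)) 0 = firstIsolated (groupRuns l) := by
  intro n
  induction n with
  | zero =>
    intro l tokens k hn _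
    have : l = [] := List.eq_nil_of_length_eq_zero (Nat.le_zero.mp hn)
    subst this
    simp [aGo, groupRuns, firstIsolated]
  | succ n ih =>
    intro l tokens k hn hdrop
    cases l with
    | nil => simp [aGo, groupRuns, firstIsolated]
    | cons t rest =>
      set kb := isIntTok t with hkb
      set run := rest.takeWhile (fun s => isIntTok s == kb) with hrun
      set rest' := rest.dropWhile (fun s => isIntTok s == kb) with hrest'
      have hsplit : rest = run ++ rest' := (List.takeWhile_append_dropWhile).symm
      have hGR : groupRuns (t :: rest) = (kb, t :: run) :: groupRuns rest' := by
        rw [groupRuns]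
      have hlenr : rest'.length ≤ rest.length := by
        rw [hrest']; exact List.length_dropWhile_le _ _
      have hEq : (t :: rest : List String) = (t :: run) ++ rest' := by
        rw [List.cons_append, hsplit]
      have hdrop' : tokens.drop (k + (t :: run).length) = rest' := by
        have h2 : tokens.drop k = (t :: run) ++ rest' := by rw [hdrop, hEq]
        have h3 := congrArg (List.drop (t :: run).length) h2
        rw [List.drop_drop, List.drop_left] at h3
        exact h3
      have htake : ∀ s ∈ run, isIntTok s = kb := by
        intro s hs
        have := List.mem_takeWhile_imp (hrun ▸ hs)
        simpa using this
      rw [hGR]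
      cases hb : kb with
      | false =>
        -- non-int block: A keeps run = 0, B skips the false group
        have hall : ∀ s ∈ t :: run, isIntTok s = false := by
          intro s hs
          rcases List.mem_cons.mp hs with h | h
          · subst h; rw [← hkb, hb]
          · rw [htake s h, hb]
        rw [firstIsolated]
        rw [if_neg (by simp)]
        rw [hEq, falseScan tokens (t :: run) hall rest' (k : Int)]
        rw [show ((k : Int) + ((t :: run).length : Int)) = ((k + (t :: run).length : Nat) : Int) by push_cast; ring]
        exact ih rest' tokens (k + (t :: run).length) (by simp at hn; omega) hdrop'
      | true =>
        -- int block of length m = 1 + run.length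
        have hall : ∀ s ∈ t :: run, isIntTok s = true := by
          intro s hs
          rcases List.mem_cons.mp hs with h | h
          · subst h; rw [← hkb, hb]
          · rw [htake s h, hb]
        rw [hEq, intScan tokens (t :: run) hall rest' (k : Int) 0]
        rw [firstIsolated]
        cases hre : rest' with
        | nil =>
          -- the int run is last: both return none
          simp [PySem.List.enumerate, aGo, firstIsolated, groupRuns]
        | cons u tail =>
          -- u is the first non-int after the run
          have hu' : (isIntTok u == kb) = false :=
            dropWhile_head_false _ rest u tail (hrest'.symm.trans hre)
          have hu : PySem.Int.ofStr? u = none := by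
            cases h : PySem.Int.ofStr? u with
            | none => rfl
            | some v => rw [hb] at hu'; simp [isIntTok, h] at hu'
          rw [PySem.List.enumerate_cons]
          simp only [aGo, hu]
          by_cases hm : run = []
          · -- m = 1: A returns tokens[k] = t, B returns head of [t]
            rw [hm]
            rw [if_pos (by simp)]
            rw [if_pos (by
              have hg : groupRuns (u :: tail) ≠ [] := by rw [groupRuns]; simp
              simp [hg])]
            rw [show ((k : Int) + (((t :: ([] : List String)).length : Nat) : Int) - 1) = (k : Int) by
              push_cast [List.length_cons, List.length_nil]; ring]
            rw [drop_eq_cons_get tokens k t rest hdrop]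
            rfl
          · -- m ≥ 2: A resets, B skips the long int group; both continue at rest'
            have hm2 : 2 ≤ (t :: run).length := by
              have h1 : 0 < run.length := List.length_pos_of_ne_nil hm
              simp only [List.length_cons]; omega
            rw [if_neg (by
              simp only [zero_add, beq_iff_eq]
              intro hcontra
              have h1 : (t :: run).length = 1 := by exact_mod_cast hcontra
              omega)]
            rw [if_neg (by
              simp only [Bool.and_eq_true, beq_iff_eq]
              rintro ⟨⟨-, hlen⟩, -⟩
              omega)]
            -- relate to IH at rest' = u :: tail
            have hdrop2 : tokens.drop (k + (t :: run).length) = u :: tail := by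
              rw [hdrop', hre]
            have hih := ih (u :: tail) tokens (k + (t :: run).length) (by
              have h1 : (u :: tail).length ≤ rest.length := by rw [← hre]; exact hlenr
              simp at hn h1 ⊢; omega) hdrop2
            rw [PySem.List.enumerate_cons] at hih
            simp only [aGo, hu] at hih
            rw [if_neg (by decide)] at hih
            have harg : ((k : Int) + (((t :: run).length : Nat) : Int) + 1) =
                (((k + (t :: run).length : Nat) : Int) + 1) := by push_cast; ring
            rw [harg]
            exact hih

-- ===== VERDICT (by name: the statement is the Claim_ definition above) =====
theorem num_people_from_tokens_spec : Claim_equal_num_people_from_tokens := by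
  unfold Claim_equal_num_people_from_tokens
  intro tokens _
  unfold Spec_num_people_from_tokens num_people_from_tokens num_people_from_tokens_alt
  have h := key tokens.length tokens tokens 0 le_rfl (by simp)
  simpa using h
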